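-- pv_equiv track=rewrite | github.com/Matteo-Candi/Master-Thesis | results/test_01/test_01_formatted.py | solve_query
-- ===== SOURCE A (Python) =====
-- def solve_query(start, end, arr):
--     mp = {}
--     for i in range(start, end+1):
--         mp[arr[i]] = mp.get(arr[i], 0) + 1
--     count = 0
--     for entry in mp:
--         if entry == mp[entry]:
--             count += 1
--     return count
-- ===== SOURCE B (Python) =====
-- def solve_query(start, end, arr):
--     sub = sorted(arr[i] for i in range(start, end + 1))
--     count = 0
--     i = 0
--     n = len(sub)
--     while i < n:
--         j = i + 1
--         while j < n and sub[j] == sub[i]: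
--             j += 1
--         if sub[i] == j - i:
--             count += 1
--         i = j
--     return count
-- ===== Notes on version B (the rewrite author's own statement) =====
-- stated objective: alternative
-- what changed: Replaces the hash-map frequency count with sort-then-scan: sort the selected elements once, walk the sorted copy grouping maximal runs of equal values, and count runs whose value equals the run length.
import Mathlib
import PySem

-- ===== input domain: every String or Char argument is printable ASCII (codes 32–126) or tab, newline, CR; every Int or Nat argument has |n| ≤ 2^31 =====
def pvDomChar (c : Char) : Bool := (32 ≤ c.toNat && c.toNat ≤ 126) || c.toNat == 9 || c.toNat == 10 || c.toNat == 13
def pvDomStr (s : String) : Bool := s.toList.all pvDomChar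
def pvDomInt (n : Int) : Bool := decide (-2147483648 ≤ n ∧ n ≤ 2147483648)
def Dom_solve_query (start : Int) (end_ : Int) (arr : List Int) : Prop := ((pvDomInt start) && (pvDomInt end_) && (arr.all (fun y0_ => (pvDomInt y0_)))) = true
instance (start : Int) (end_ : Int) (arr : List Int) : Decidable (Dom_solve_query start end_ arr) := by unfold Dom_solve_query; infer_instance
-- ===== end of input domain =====

-- B replaces A's hash-map frequency count by sort-then-scan over runs of equal values (alternative algorithm, same results).

-- ===== PORT A =====
-- mp = {}; for i in range(start, end+1): mp[arr[i]] = mp.get(arr[i], 0) + 1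
-- count = 0; for entry in mp: if entry == mp[entry]: count += 1; return count
def solve_query (start : Int) (end_ : Int) (arr : List Int) : Int :=
  let mp : PySem.Dict Int Int :=
    (PySem.List.pyRange start (end_ + 1) 1).foldl
      (fun mp i => mp.insert (PySem.List.pyGetD arr i 0)
                     (mp.getD (PySem.List.pyGetD arr i 0) 0 + 1))
      PySem.Dict.empty
  mp.keys.foldl (fun count entry => if entry == mp.getD entry 0 then count + 1 else count) 0

-- ===== PORT B =====
-- the outer while loop of Source B: each step consumes one maximal run of equal values
-- (the inner 'while sub[j] == sub[i]' is the takeWhile/dropWhile split of the run)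
def pvRunCount : List Int → Int
  | [] => 0
  | x :: rest =>
      (if x == (1 : Int) + (rest.takeWhile (· == x)).length then 1 else 0)
        + pvRunCount (rest.dropWhile (· == x))
termination_by s => s.length
decreasing_by
  simpa using Nat.lt_succ_of_le (List.Sublist.length_le (List.dropWhile_sublist _))

def solve_query_alt (start : Int) (end_ : Int) (arr : List Int) : Int :=
  let sub := PySem.List.sorted
    ((PySem.List.pyRange start (end_ + 1) 1).map (fun i => PySem.List.pyGetD arr i 0))
    (fun x => x) false
  pvRunCount sub

-- ===== PRECONDITION & SPEC =====
-- Pre_ excludes exactly the inputs where Python raises IndexError: some index i in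
-- range(start, end+1) outside [-len(arr), len(arr)-1] (both A and B raise there).
def Pre_solve_query (start : Int) (end_ : Int) (arr : List Int) : Prop :=
  end_ < start ∨ (-(arr.length : Int) ≤ start ∧ end_ < (arr.length : Int))
instance (start : Int) (end_ : Int) (arr : List Int) : Decidable (Pre_solve_query start end_ arr) := by unfold Pre_solve_query; infer_instance

def pvWitness_solve_query : Int × Int × List Int := (0, 2, [1, 2, 2])

def Spec_solve_query (start : Int) (end_ : Int) (arr : List Int) (out : Int) : Prop := out = solve_query_alt start end_ arr
instance (start : Int) (end_ : Int) (arr : List Int) (out : Int) : Decidable (Spec_solve_query start end_ arr out) := by unfold Spec_solve_query; infer_instance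

-- ===== CLAIM (what is proved, stated in full; the proofs are below) =====
def Claim_equal_solve_query : Prop := ∀ (start : Int) (end_ : Int) (arr : List Int), Dom_solve_query start end_ arr → Pre_solve_query start end_ arr → Spec_solve_query start end_ arr (solve_query start end_ arr)

-- ===== LEMMAS AND PROOFS =====

-- number of distinct values in L equal to their multiplicity in L
def pvGood (L : List Int) : Nat :=
  (PySem.Set.ofList L).countP (fun v => v == (L.count v : Int))

theorem pvGood_perm {l₁ l₂ : List Int} (h : l₁.Perm l₂) : pvGood l₁ = pvGood l₂ := by
  unfold pvGood
  have hset : (PySem.Set.ofList l₁).Perm (PySem.Set.ofList l₂) := by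
    refine (List.perm_ext_iff_of_nodup (PySem.Set.nodup_ofList _) (PySem.Set.nodup_ofList _)).mpr ?_
    intro a; simp only [PySem.Set.mem_ofList]; exact h.mem_iff
  calc (PySem.Set.ofList l₁).countP (fun v => v == (l₁.count v : Int))
      = (PySem.Set.ofList l₁).countP (fun v => v == (l₂.count v : Int)) := by
        refine List.countP_congr ?_
        intro v _; rw [h.count_eq]
    _ = (PySem.Set.ofList l₂).countP (fun v => v == (l₂.count v : Int)) := hset.countP_eq _

theorem pvRunCount_sorted (s : List Int) (hs : s.Pairwise (· ≤ ·)) :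
    pvRunCount s = (pvGood s : Int) := by
  induction s using pvRunCount.induct with
  | case1 => simp [pvRunCount, pvGood]
  | case2 x rest IH =>
    have hle : ∀ y ∈ rest, x ≤ y := (List.pairwise_cons.mp hs).1
    have hpw : rest.Pairwise (· ≤ ·) := (List.pairwise_cons.mp hs).2
    set run := rest.takeWhile (· == x) with hrundef
    set rest' := rest.dropWhile (· == x) with hrest'def
    have hsplit : run ++ rest' = rest := List.takeWhile_append_dropWhile
    have hrunx : ∀ y ∈ run, y = x := by
      intro y hy
      rw [hrundef] at hy
      have h2 : (y == x) = true := List.mem_takeWhile_imp (p := (· == x)) hy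
      exact eq_of_beq h2
    have hpw' : rest'.Pairwise (· ≤ ·) := hpw.sublist (List.dropWhile_sublist _)
    have hx : x ∉ rest' := by
      cases hc : rest' with
      | nil => simp
      | cons y t =>
        have hy : (y == x) = false := by
          have := List.head_dropWhile_not (· == x) (l := rest)
          rw [← hrest'def, hc] at this; simpa using this
        have hyne : y ≠ x := by simpa using hy
        have hymem : y ∈ rest := (List.dropWhile_sublist _).mem (by rw [← hrest'def, hc]; simp)
        have hxy : x ≤ y := hle y hymem
        have hpwc := hpw'; rw [hc] at hpwc
        intro hmem
        rcases List.mem_cons.mp hmem with h | h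
        · exact hyne h.symm
        · exact hyne (le_antisymm ((List.pairwise_cons.mp hpwc).1 x h) hxy)
    have hcount0 : rest'.count x = 0 := List.count_eq_zero.mpr hx
    have hruncount : run.count x = run.length :=
      List.count_eq_length.mpr (fun b hb => (hrunx b hb).symm)
    have hcx : (x :: rest).count x = run.length + 1 := by
      rw [List.count_cons_self, ← hsplit, List.count_append, hruncount, hcount0]
    have hcv : ∀ v, v ≠ x → (x :: rest).count v = rest'.count v := by
      intro v hv
      have h1 : run.count v = 0 := List.count_eq_zero.mpr (fun hmem => hv (hrunx v hmem))
      have h2 : rest.count v = run.count v + rest'.count v := by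
        rw [← hsplit, List.count_append]
      simp [h2, h1, Ne.symm hv]
    -- distinct values of x :: rest, up to permutation
    have hperm : (PySem.Set.ofList (x :: rest)).Perm (x :: PySem.Set.ofList rest') := by
      refine (List.perm_ext_iff_of_nodup (PySem.Set.nodup_ofList _) ?_).mpr ?_
      · exact List.nodup_cons.mpr ⟨by simpa [PySem.Set.mem_ofList] using hx, PySem.Set.nodup_ofList _⟩
      · intro a
        simp only [PySem.Set.mem_ofList, List.mem_cons]
        constructor
        · rintro (rfl | ha)
          · exact Or.inl rfl
          · rw [← hsplit] at ha
            rcases List.mem_append.mp ha with h | h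
            · exact Or.inl (hrunx a h)
            · exact Or.inr (by simpa [PySem.Set.mem_ofList] using h)
        · rintro (rfl | ha)
          · exact Or.inl rfl
          · exact Or.inr (by rw [← hsplit]; exact List.mem_append_right _ (by simpa [PySem.Set.mem_ofList] using ha))
    have hgood : pvGood (x :: rest)
        = (if x == ((x :: rest).count x : Int) then 1 else 0) + pvGood rest' := by
      unfold pvGood
      rw [hperm.countP_eq, List.countP_cons]
      have hcongr : (PySem.Set.ofList rest').countP (fun v => v == ((x :: rest).count v : Int))
          = (PySem.Set.ofList rest').countP (fun v => v == (rest'.count v : Int)) := by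
        refine List.countP_congr ?_
        intro v hv
        have hvne : v ≠ x := by
          intro h; subst h; exact hx (by simpa [PySem.Set.mem_ofList] using hv)
        rw [hcv v hvne]
      rw [hcongr]; split <;> omega
    have hiff : (x == (1 : Int) + (run.length : Int)) = (x == (((x :: rest).count x : Nat) : Int)) := by
      rw [hcx]; push_cast; ring_nf
    rw [pvRunCount, IH hpw', hgood, hiff]
    split <;> push_cast <;> ring

theorem solve_query_eq_good (start end_ : Int) (arr : List Int) :
    solve_query start end_ arr
      = (pvGood ((PySem.List.pyRange start (end_ + 1) 1).map (fun i => PySem.List.pyGetD arr i 0)) : Int) := by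
  unfold solve_query pvGood
  set L := (PySem.List.pyRange start (end_ + 1) 1).map (fun i => PySem.List.pyGetD arr i 0) with hL
  have hfold : (PySem.List.pyRange start (end_ + 1) 1).foldl
      (fun mp i => mp.insert (PySem.List.pyGetD arr i 0)
                     (mp.getD (PySem.List.pyGetD arr i 0) 0 + 1))
      PySem.Dict.empty
      = PySem.Dict.counter L := by
    rw [hL, ← PySem.Dict.foldl_insert_getD_add_one_eq_counter]
    simp only [List.foldl_map]
  rw [hfold, PySem.List.foldl_if_add_one, PySem.Dict.keys_counter]
  have : (PySem.Set.ofList L).countP (fun k => k == (PySem.Dict.counter L).getD k 0)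
      = (PySem.Set.ofList L).countP (fun v => v == (L.count v : Int)) := by
    refine List.countP_congr ?_
    intro v _; rw [PySem.Dict.getD_counter]
  rw [this]; ring

-- ===== VERDICT (by name: the statement is the Claim_ definition above) =====
theorem solve_query_spec : Claim_equal_solve_query := by
  intro start end_ arr _ _
  unfold Spec_solve_query solve_query_alt
  set L := (PySem.List.pyRange start (end_ + 1) 1).map (fun i => PySem.List.pyGetD arr i 0) with hL
  rw [solve_query_eq_good,
      pvRunCount_sorted _ (PySem.List.sorted_pairwise L (fun x => x) ),
      pvGood_perm (PySem.List.sorted_perm L (fun x => x) false)]
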